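-- pv_equiv track=rewrite | github.com/eroge-69/PyToExe | python-files/regional_namespace_merge.py | comment_fix
-- ===== SOURCE A (Python) =====
-- def comment_fix(block):
--     index = len(block) - 1
--     # cycle from the bottom
--     for line in reversed(block):
--         # If text that is not ; "" [ are found, end if is placed there
--         if not line.strip().startswith(';') and not line.strip().startswith('[') and not line.strip() == "":
--             block[index] = block[index].rstrip()+"\nendif\n\n"
--             break
--         # removes any indentation given to comments as a result of the previous function
--         elif line.strip().startswith(';'):
--             block[index] = block[index].lstrip()
--         index -= 1
--     line = ""
--     for x in block:
--         line = line + x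
--     block = []
--     return line
-- ===== SOURCE B (Python) =====
-- def _is_content(line):
--     s = line.strip()
--     return bool(s) and not s.startswith((';', '['))
--
--
-- def comment_fix(block):
--     # Note: unlike the original, this does not mutate the caller's list;
--     # only the return value is equivalent.
--     last = -1
--     for i, line in enumerate(block):
--         if _is_content(line):
--             last = i
--     head = block[:last + 1]
--     tail = [x.lstrip() if x.strip().startswith(';') else x
--             for x in block[last + 1:]]
--     if last >= 0:
--         head[last] = head[last].rstrip() + "\nendif\n\n"
--     return ''.join(head + tail)
-- ===== Notes on version B (the rewrite author's own statement) =====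
-- stated objective: simpler
-- what changed: Replaces the reversed in-place scan-with-break and the manual string-concatenation loop by a forward pass that records the index of the last content line, a slice into head/tail with a comprehension lstripping comment lines in the tail, one targeted endif assignment, and ''.join; B does not mutate the caller's list (return values are equivalent).
import Mathlib
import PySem

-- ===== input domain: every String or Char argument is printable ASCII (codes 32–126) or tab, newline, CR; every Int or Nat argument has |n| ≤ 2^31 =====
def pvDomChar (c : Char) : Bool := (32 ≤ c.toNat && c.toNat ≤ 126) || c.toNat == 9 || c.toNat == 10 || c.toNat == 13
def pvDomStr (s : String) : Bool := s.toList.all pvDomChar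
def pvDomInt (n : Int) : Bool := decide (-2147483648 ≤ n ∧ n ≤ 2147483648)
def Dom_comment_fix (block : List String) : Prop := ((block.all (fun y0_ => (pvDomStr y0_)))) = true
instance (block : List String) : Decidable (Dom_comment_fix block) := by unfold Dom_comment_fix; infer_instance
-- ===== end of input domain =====

-- B changes the decomposition: a forward last-content-index pass, head/tail slices and
-- ''.join, instead of A's reversed in-place scan with break and a manual concatenation
-- loop; A mutates its argument list, B does not — the claim is about the return value only.

-- ===== PORT A =====
-- A's reversed for-loop with break, acting on the reversed list: the head of the
-- reversed list is the current (bottom-most unprocessed) line, `rest` are the earlier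
-- lines, left untouched after the break.
def cfLoopA : List String → List String
  | [] => []
  | line :: rest =>
    if !(PySem.Str.startswith (PySem.Str.strip line) ";")
        && !(PySem.Str.startswith (PySem.Str.strip line) "[")
        && (PySem.Str.strip line != "") then
      -- block[index] = block[index].rstrip()+"\nendif\n\n"; break
      (PySem.Str.rstrip line ++ "\nendif\n\n") :: rest
    else if PySem.Str.startswith (PySem.Str.strip line) ";" then
      PySem.Str.lstrip line :: cfLoopA rest
    else
      line :: cfLoopA rest

def comment_fix (block : List String) : String :=
  let block' := (cfLoopA block.reverse).reverse
  -- line = ""; for x in block: line = line + x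
  block'.foldl (fun line x => line ++ x) ""

-- ===== PORT B =====
def isContentB (line : String) : Bool :=
  let s := PySem.Str.strip line
  (s != "") && !(PySem.Str.startswith s ";" || PySem.Str.startswith s "[")

def comment_fix_alt (block : List String) : String :=
  let last : Int := (PySem.List.enumerate block 0).foldl
      (fun acc p => if isContentB p.2 then p.1 else acc) (-1)
  let head := PySem.List.slice block none (some (last + 1))
  let tail := (PySem.List.slice block (some (last + 1)) none).map
      (fun x => if PySem.Str.startswith (PySem.Str.strip x) ";" then PySem.Str.lstrip x else x)
  let head' := if 0 ≤ last then
      head.set last.toNat (PySem.Str.rstrip (PySem.List.pyGetD head last "") ++ "\nendif\n\n")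
    else head
  PySem.Str.join "" (head' ++ tail)

-- ===== PRECONDITION & SPEC =====
def Spec_comment_fix (block : List String) (out : String) : Prop := out = comment_fix_alt block
instance (block : List String) (out : String) : Decidable (Spec_comment_fix block out) := by unfold Spec_comment_fix; infer_instance

-- ===== CLAIM (what is proved, stated in full; the proofs are below) =====
def Claim_equal_comment_fix : Prop := ∀ (block : List String), Dom_comment_fix block → Spec_comment_fix block (comment_fix block)

-- ===== LEMMAS AND PROOFS =====

-- A's branch test equals B's content predicate (same Bool, different connective shape)
theorem condA_eq_isContentB (line : String) :
    (!(PySem.Str.startswith (PySem.Str.strip line) ";")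
      && !(PySem.Str.startswith (PySem.Str.strip line) "[")
      && (PySem.Str.strip line != "")) = isContentB line := by
  simp only [isContentB]
  cases PySem.Str.startswith (PySem.Str.strip line) ";" <;>
    cases PySem.Str.startswith (PySem.Str.strip line) "[" <;>
    cases (PySem.Str.strip line != "") <;> simp

-- B's last-content index, as a named function of the input
def lastIdxB (block : List String) : Int :=
  (PySem.List.enumerate block 0).foldl
      (fun acc p => if isContentB p.2 then p.1 else acc) (-1)

-- B's tail transformation
def tailF (x : String) : String :=
  if PySem.Str.startswith (PySem.Str.strip x) ";" then PySem.Str.lstrip x else x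

-- B's resulting list of lines (comment_fix_alt with its lets named and inlined)
def bList (block : List String) : List String :=
  (if 0 ≤ lastIdxB block then
      (PySem.List.slice block none (some (lastIdxB block + 1))).set (lastIdxB block).toNat
        (PySem.Str.rstrip (PySem.List.pyGetD
            (PySem.List.slice block none (some (lastIdxB block + 1))) (lastIdxB block) "")
          ++ "\nendif\n\n")
    else PySem.List.slice block none (some (lastIdxB block + 1)))
  ++ (PySem.List.slice block (some (lastIdxB block + 1)) none).map tailF

theorem comment_fix_alt_eq (block : List String) :
    comment_fix_alt block = PySem.Str.join "" (bList block) := rfl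

-- snoc step for the last-content index
theorem lastIdxB_snoc (xs : List String) (x : String) :
    lastIdxB (xs ++ [x]) = if isContentB x then (xs.length : Int) else lastIdxB xs := by
  unfold lastIdxB
  rw [PySem.List.enumerate_append]
  simp [PySem.List.enumerate, List.foldl_append]

theorem lastIdxB_bounds (xs : List String) :
    -1 ≤ lastIdxB xs ∧ lastIdxB xs < xs.length := by
  induction xs using List.reverseRecOn with
  | nil => simp [lastIdxB, PySem.List.enumerate]
  | append_singleton ys y ih =>
    rw [lastIdxB_snoc]
    rcases ih with ⟨h1, h2⟩
    by_cases h : isContentB y = true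
    · simp [h]
    · simp [h, List.length_append]; omega

-- ''.join is flattening (on the char-list side)
theorem chars_join_empty (css : List (List Char)) : PySem.Chars.join [] css = css.flatten := by
  simp only [PySem.Chars.join, List.intercalate]
  induction css with
  | nil => simp
  | cons a t ih => cases t <;> simp_all [List.intersperse]

-- the manual concatenation loop is ''.join
theorem foldl_append_eq_join (l : List String) :
    l.foldl (fun line x => line ++ x) "" = PySem.Str.join "" l := by
  have key : ∀ (l : List String) (a : String),
      (l.foldl (fun line x => line ++ x) a).toList
        = a.toList ++ (l.map String.toList).flatten := by
    intro l
    induction l with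
    | nil => simp
    | cons h t ih => intro a; simp [List.foldl_cons, ih, String.toList_append]
  apply String.toList_inj.mp
  rw [key]
  simp [PySem.Str.join, chars_join_empty]

-- core list-level equivalence: A's processed block equals B's head'/tail assembly
theorem cfLoopA_eq_bList (block : List String) :
    (cfLoopA block.reverse).reverse = bList block := by
  induction block using List.reverseRecOn with
  | nil => simp [cfLoopA, bList, lastIdxB, PySem.List.enumerate, PySem.List.slice_to,
      PySem.List.slice_from]
  | append_singleton xs x ih =>
    rw [List.reverse_append]
    simp only [List.reverse_singleton, List.singleton_append]
    by_cases hc : isContentB x = true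
    · -- content line at the bottom: break with the endif line
      have hA : cfLoopA (x :: xs.reverse)
          = (PySem.Str.rstrip x ++ "\nendif\n\n") :: xs.reverse := by
        rw [cfLoopA, condA_eq_isContentB, if_pos hc]
      rw [hA, List.reverse_cons, List.reverse_reverse]
      unfold bList
      rw [lastIdxB_snoc, if_pos hc]
      have h0 : (0 : Int) ≤ (xs.length : Int) := by positivity
      rw [if_pos h0]
      have hto : (xs.length : Int) + 1 = ((xs.length + 1 : Nat) : Int) := by push_cast; ring
      rw [hto, PySem.List.slice_to_natCast, PySem.List.slice_from_natCast]
      rw [List.take_of_length_le (by simp), List.drop_eq_nil_of_le (by simp)]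
      simp [PySem.List.pyGetD_natCast]
    · -- non-content bottom line: it is mapped by tailF, the rest recurses
      have hA : cfLoopA (x :: xs.reverse) = tailF x :: cfLoopA xs.reverse := by
        rw [cfLoopA, condA_eq_isContentB, if_neg hc]
        by_cases hs : PySem.Str.startswith (PySem.Str.strip x) ";" = true
        · rw [if_pos hs]; simp only [tailF, if_pos hs]
        · rw [if_neg hs]; simp only [tailF, if_neg hs]
      rw [hA, List.reverse_cons, ih]
      unfold bList
      rw [lastIdxB_snoc, if_neg hc]
      rcases lastIdxB_bounds xs with ⟨h1, h2⟩
      have hcast : lastIdxB xs + 1 = (((lastIdxB xs + 1).toNat : Nat) : Int) := by omega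
      rw [hcast, PySem.List.slice_to_natCast, PySem.List.slice_from_natCast,
          PySem.List.slice_to_natCast, PySem.List.slice_from_natCast]
      have hle : ((lastIdxB xs + 1).toNat) ≤ xs.length := by omega
      rw [List.take_append_of_le_length hle, List.drop_append_of_le_length hle]
      simp [List.map_append]

-- ===== VERDICT (by name: the statement is the Claim_ definition above) =====
theorem comment_fix_spec : Claim_equal_comment_fix := by
  intro block _
  unfold Spec_comment_fix comment_fix
  rw [foldl_append_eq_join, cfLoopA_eq_bList, comment_fix_alt_eq]
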